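-- pv_equiv track=rewrite | github.com/yonghyeun/Algorithm | 프로그래머스/lv2/42586. 기능개발/기능개발.py | solution
-- ===== SOURCE A (Python) =====
-- from collections import deque
--
-- def solution(progresses, speeds):
--     arr = deque()
--
--     for p,s in zip(progresses, speeds):
--         days = 0
--         while p < 100:
--             p += s
--             days += 1
--         arr.append(days)
--
--     answer = []
--     stack = []
--
--     while arr:
--
--         current = arr.popleft()
--
--         if len(stack) == 0:
--             stack.append(current)
--         else:
--             if current > stack[0]:
--                 answer.append(len(stack))
--                 while stack:
--                     stack.pop()
--                 stack.append(current)
--             else: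
--                 stack.append(current)
--     if len(stack) != 0:
--         answer.append(len(stack))
--
--
--
--     return answer
-- ===== SOURCE B (Python) =====
-- def solution(progresses, speeds):
--     # closed-form days per feature, then one grouping pass with (lead, count)
--     days = [0 if p >= 100 else -((p - 100) // s) for p, s in zip(progresses, speeds)]
--     answer = []
--     if not days:
--         return answer
--     lead, count = days[0], 1
--     for d in days[1:]:
--         if d > lead:
--             answer.append(count)
--             lead, count = d, 1
--         else:
--             count += 1
--     answer.append(count)
--     return answer
-- ===== Notes on version B (the rewrite author's own statement) =====
-- stated objective: simpler
-- what changed: Replaces the per-feature while-loop accumulation with a closed-form ceiling division for the days, and replaces the deque+stack grouping with a single pass keeping only the current group's lead day and a count.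
import Mathlib
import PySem

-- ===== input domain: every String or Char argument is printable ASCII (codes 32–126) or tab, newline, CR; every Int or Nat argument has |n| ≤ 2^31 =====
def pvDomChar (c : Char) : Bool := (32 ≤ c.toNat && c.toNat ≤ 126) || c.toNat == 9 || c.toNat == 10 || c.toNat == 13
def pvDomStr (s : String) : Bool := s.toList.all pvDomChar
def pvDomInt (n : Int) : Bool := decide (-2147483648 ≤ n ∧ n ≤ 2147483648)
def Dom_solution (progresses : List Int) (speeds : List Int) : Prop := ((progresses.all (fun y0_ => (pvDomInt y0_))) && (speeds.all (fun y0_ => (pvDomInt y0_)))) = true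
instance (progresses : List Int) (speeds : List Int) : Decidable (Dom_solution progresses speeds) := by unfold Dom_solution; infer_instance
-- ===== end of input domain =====

-- B replaces A's per-feature while-loop with a closed-form ceiling division and the
-- deque+stack grouping with a single pass keeping the group's lead day and a count (simpler).

-- ===== PORT A =====
-- the inner 'while p < 100: p += s; days += 1' loop; the '0 < s' part of the guard only
-- makes the recursion total in Lean — Python diverges there, and Pre_ excludes it
def countDays (p s : Int) : Int :=
  if _h : p < 100 ∧ 0 < s then countDays (p + s) s + 1 else 0
termination_by (100 - p).toNat
decreasing_by omega

-- the 'while arr' loop: state = (answer, stack); stack[0] on a nonempty list is headI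
def stackLoop (arr : List Int) (answer : List Int) (stack : List Int) : List Int × List Int :=
  match arr with
  | [] => (answer, stack)
  | current :: rest =>
    if stack.length = 0 then stackLoop rest answer (stack ++ [current])
    else if current > stack.headI then stackLoop rest (answer ++ [(stack.length : Int)]) [current]
    else stackLoop rest answer (stack ++ [current])

def solution (progresses : List Int) (speeds : List Int) : List Int :=
  let arr := (List.zip progresses speeds).map (fun ps => countDays ps.1 ps.2)
  let res := stackLoop arr [] []
  if res.2.length ≠ 0 then res.1 ++ [(res.2.length : Int)] else res.1

-- ===== PORT B =====
def bDays (p s : Int) : Int := if p ≥ 100 then 0 else -(PySem.Int.floordiv (p - 100) s)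

def groupLoop (ds : List Int) (lead : Int) (count : Int) (answer : List Int) : List Int :=
  match ds with
  | [] => answer ++ [count]
  | d :: rest =>
    if d > lead then groupLoop rest d 1 (answer ++ [count])
    else groupLoop rest lead (count + 1) answer

def solution_alt (progresses : List Int) (speeds : List Int) : List Int :=
  let days := (List.zip progresses speeds).map (fun ps => bDays ps.1 ps.2)
  match days with
  | [] => []
  | d :: rest => groupLoop rest d 1 []

-- ===== PRECONDITION & SPEC =====
-- A's while loop diverges when some feature has progress < 100 and speed ≤ 0; Pre_ excludes exactly that.
def Pre_solution (progresses : List Int) (speeds : List Int) : Prop :=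
  ∀ ps ∈ List.zip progresses speeds, ps.1 < 100 → 0 < ps.2
instance (progresses : List Int) (speeds : List Int) : Decidable (Pre_solution progresses speeds) := by unfold Pre_solution; infer_instance
def pvWitness_solution : List Int × List Int := ([93, 30, 55], [1, 30, 5])

def Spec_solution (progresses : List Int) (speeds : List Int) (out : List Int) : Prop := out = solution_alt progresses speeds
instance (progresses : List Int) (speeds : List Int) (out : List Int) : Decidable (Spec_solution progresses speeds out) := by unfold Spec_solution; infer_instance

-- ===== CLAIM (what is proved, stated in full; the proofs are below) =====
def Claim_equal_solution : Prop := ∀ (progresses : List Int) (speeds : List Int), Dom_solution progresses speeds → Pre_solution progresses speeds → Spec_solution progresses speeds (solution progresses speeds)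

-- ===== LEMMAS AND PROOFS =====

theorem countDays_bounds (p s : Int) (hs : 0 < s) (hp : p < 100) :
    (countDays p s - 1) * s < 100 - p ∧ 100 - p ≤ countDays p s * s := by
  rw [countDays]
  rw [dif_pos ⟨hp, hs⟩]
  by_cases h2 : p + s < 100
  · have ih := countDays_bounds (p + s) s hs h2
    constructor <;> nlinarith [ih.1, ih.2]
  · have h0 : countDays (p + s) s = 0 := by
      rw [countDays]; rw [dif_neg (by omega)]
    rw [h0]; constructor <;> nlinarith
termination_by (100 - p).toNat
decreasing_by omega

theorem countDays_eq_bDays (p s : Int) (h : p < 100 → 0 < s) : countDays p s = bDays p s := by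
  by_cases hp : p < 100
  · have hs := h hp
    have hb := (PySem.Int.neg_floordiv_neg_eq_iff_of_pos (a := 100 - p) (b := s)
        (q := countDays p s) hs).mpr (countDays_bounds p s hs hp)
    simp only [bDays, if_neg (by omega : ¬ p ≥ 100)]
    rw [show p - 100 = -(100 - p) by ring, hb]
  · rw [countDays, dif_neg (by omega)]
    have hge : p ≥ 100 := by omega
    simp [bDays, hge]

theorem headI_append_of_ne_nil (stack : List Int) (d : Int) (h : stack ≠ []) :
    (stack ++ [d]).headI = stack.headI := by
  cases stack with
  | nil => exact absurd rfl h
  | cons a t => rfl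

theorem group_eq (ds : List Int) (answer : List Int) (stack : List Int) (hne : stack ≠ []) :
    (if (stackLoop ds answer stack).2.length ≠ 0
       then (stackLoop ds answer stack).1 ++ [((stackLoop ds answer stack).2.length : Int)]
       else (stackLoop ds answer stack).1)
    = groupLoop ds stack.headI (stack.length : Int) answer := by
  induction ds generalizing answer stack with
  | nil =>
    simp [stackLoop, groupLoop, List.length_eq_zero_iff, hne]
  | cons d rest ih =>
    have hlen : stack.length ≠ 0 := by simpa [List.length_eq_zero_iff] using hne
    by_cases hgt : d > stack.headI
    · simp only [stackLoop, if_neg hlen, if_pos hgt, groupLoop]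
      simpa using ih (answer ++ [(stack.length : Int)]) [d] (by simp)
    · simp only [stackLoop, if_neg hlen, if_neg hgt, groupLoop]
      rw [ih answer (stack ++ [d]) (by simp)]
      rw [headI_append_of_ne_nil stack d hne]
      simp

-- ===== VERDICT (by name: the statement is the Claim_ definition above) =====
theorem solution_spec : Claim_equal_solution := by
  intro progresses speeds _ hpre
  unfold Spec_solution solution solution_alt
  have hmap : (List.zip progresses speeds).map (fun ps => countDays ps.1 ps.2)
      = (List.zip progresses speeds).map (fun ps => bDays ps.1 ps.2) :=
    List.map_congr_left (fun ps hm => countDays_eq_bDays ps.1 ps.2 (hpre ps hm))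
  rw [hmap]
  cases h : (List.zip progresses speeds).map (fun ps => bDays ps.1 ps.2) with
  | nil => simp [stackLoop]
  | cons d rest =>
    simp only []
    rw [show stackLoop (d :: rest) [] [] = stackLoop rest [] [d] by simp [stackLoop]]
    simpa using group_eq rest [] [d] (by simp)
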